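-- pv_equiv track=rewrite | github.com/pypi-data/pypi-mirror-385 | packages/bengal/bengal-0.1.3.tar.gz/bengal-0.1.3/bengal/autodoc/docstring_parser.py | _parse_note_section
-- ===== SOURCE A (Python) =====
-- def _parse_note_section(section: str) -> list[str]:
--     """Extract notes or warnings."""
--     notes = []
--     if not section:
--         return notes
--
--     # Split by paragraphs
--     current_note = []
--     for line in section.split("\n"):
--         if line.strip():
--             current_note.append(line.strip())
--         elif current_note:
--             notes.append(" ".join(current_note))
--             current_note = []
--
--     if current_note:
--         notes.append(" ".join(current_note))
--
--     return notes
-- ===== SOURCE B (Python) =====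
-- from itertools import groupby
--
-- def _parse_note_section(section: str) -> list[str]:
--     """Extract notes or warnings."""
--     return [
--         " ".join(line.strip() for line in group)
--         for nonblank, group in groupby(section.split("\n"), key=lambda l: bool(l.strip()))
--         if nonblank
--     ]
-- ===== Notes on version B (the rewrite author's own statement) =====
-- stated objective: simpler
-- what changed: Replaced the explicit current_note accumulator with flush-on-blank/flush-at-end logic by a group-then-map traversal: groupby on blank/non-blank lines, joining each non-blank run.
import Mathlib
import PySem

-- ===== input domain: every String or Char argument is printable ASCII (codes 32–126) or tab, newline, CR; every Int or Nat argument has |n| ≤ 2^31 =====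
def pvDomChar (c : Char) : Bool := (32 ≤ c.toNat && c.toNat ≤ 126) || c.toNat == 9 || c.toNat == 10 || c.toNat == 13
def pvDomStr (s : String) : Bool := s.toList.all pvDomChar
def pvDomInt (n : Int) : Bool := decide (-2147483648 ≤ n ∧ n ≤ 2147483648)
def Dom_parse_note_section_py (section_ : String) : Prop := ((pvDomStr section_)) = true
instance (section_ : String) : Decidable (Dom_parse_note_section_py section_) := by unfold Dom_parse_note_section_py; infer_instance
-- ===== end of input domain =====

-- B replaces A's running current_note accumulator (flush on blank line / flush at end) by a
-- group-then-map traversal over runs of non-blank lines (simpler decomposition).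

-- ===== PORT A =====
-- the loop body of A: if line.strip(): append stripped line; elif current_note: flush
def pvStepA (st : List String × List String) (line : String) : List String × List String :=
  if PySem.Str.strip line ≠ "" then (st.1, st.2 ++ [PySem.Str.strip line])
  else if st.2 ≠ [] then (st.1 ++ [PySem.Str.join " " st.2], [])
  else st

-- the final 'if current_note: notes.append(...)'
def pvFinishA (st : List String × List String) : List String :=
  if st.2 ≠ [] then st.1 ++ [PySem.Str.join " " st.2] else st.1

-- sep "\n" ≠ "" so split? is always some; getD only makes it total
def parse_note_section_py (section_ : String) : List String :=
  if section_ = "" then []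
  else pvFinishA (((PySem.Str.split? section_ "\n").getD []).foldl pvStepA ([], []))

-- ===== PORT B =====
-- groupby key: bool(line.strip())
def pvNonBlank (line : String) : Bool := PySem.Str.strip line ≠ ""

-- the groupby comprehension: skip a blank group, turn a non-blank run into one joined note
def pvNotesGroups (lines : List String) : List String :=
  match lines with
  | [] => []
  | l :: ls =>
    if pvNonBlank l then
      PySem.Str.join " " (((l :: ls).takeWhile pvNonBlank).map PySem.Str.strip) ::
        pvNotesGroups ((l :: ls).dropWhile pvNonBlank)
    else pvNotesGroups ls
termination_by lines.length
decreasing_by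
  · simp only [List.dropWhile]
    split
    · exact Nat.lt_succ_of_le (List.length_dropWhile_le _ _)
    · simp_all
  · simp

def parse_note_section_py_alt (section_ : String) : List String :=
  pvNotesGroups ((PySem.Str.split? section_ "\n").getD [])

-- ===== PRECONDITION & SPEC =====
def Spec_parse_note_section_py (section_ : String) (out : List String) : Prop := out = parse_note_section_py_alt section_
instance (section_ : String) (out : List String) : Decidable (Spec_parse_note_section_py section_ out) := by unfold Spec_parse_note_section_py; infer_instance

-- ===== CLAIM (what is proved, stated in full; the proofs are below) =====
def Claim_equal_parse_note_section_py : Prop := ∀ (section_ : String), Dom_parse_note_section_py section_ → Spec_parse_note_section_py section_ (parse_note_section_py section_)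

-- ===== LEMMAS AND PROOFS =====

-- proof helper: B's notes when a run `cur` of already-stripped lines is pending
def pvNotesCur (cur : List String) (lines : List String) : List String :=
  match lines with
  | [] => if cur = [] then [] else [PySem.Str.join " " cur]
  | l :: ls =>
    if pvNonBlank l then pvNotesCur (cur ++ [PySem.Str.strip l]) ls
    else (if cur = [] then [] else [PySem.Str.join " " cur]) ++ pvNotesCur [] ls

lemma pvStepA_blank {l : String} (h : pvNonBlank l = false) (notes cur : List String) :
    pvStepA (notes, cur) l = if cur = [] then (notes, cur) else (notes ++ [PySem.Str.join " " cur], []) := by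
  simp only [pvNonBlank, decide_eq_false_iff_not, not_not] at h
  by_cases hc : cur = [] <;> simp [pvStepA, h, hc]

lemma pvStepA_nonblank {l : String} (h : pvNonBlank l = true) (notes cur : List String) :
    pvStepA (notes, cur) l = (notes, cur ++ [PySem.Str.strip l]) := by
  simp only [pvNonBlank, decide_eq_true_eq] at h
  simp [pvStepA, h]

lemma pvFold_eq_pvNotesCur (lines : List String) :
    ∀ notes cur, pvFinishA (lines.foldl pvStepA (notes, cur)) = notes ++ pvNotesCur cur lines := by
  induction lines with
  | nil =>
    intro notes cur
    simp only [List.foldl_nil, pvNotesCur, pvFinishA]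
    by_cases h : cur = [] <;> simp [h]
  | cons l ls ih =>
    intro notes cur
    rw [List.foldl_cons]
    by_cases h : pvNonBlank l
    · rw [pvStepA_nonblank h, ih]
      simp [pvNotesCur, h]
    · rw [pvStepA_blank (Bool.eq_false_iff.mpr h)]
      by_cases hc : cur = []
      · rw [if_pos hc, ih]
        simp [pvNotesCur, h, hc]
      · rw [if_neg hc, ih]
        simp [pvNotesCur, h, hc]

lemma pvNotesCur_ne_nil (ls : List String) :
    ∀ cur, cur ≠ [] →
      pvNotesCur cur ls
      = PySem.Str.join " " (cur ++ (ls.takeWhile pvNonBlank).map PySem.Str.strip)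
        :: pvNotesCur [] (ls.dropWhile pvNonBlank) := by
  induction ls with
  | nil => intro cur hc; simp [pvNotesCur, hc]
  | cons l ls ih =>
    intro cur hc
    by_cases h : pvNonBlank l
    · rw [pvNotesCur, if_pos h, ih _ (by simp), List.takeWhile_cons, List.dropWhile_cons]
      simp [h, List.append_assoc]
    · rw [pvNotesCur, if_neg h, List.takeWhile_cons, List.dropWhile_cons]
      simp only [h, Bool.false_eq_true, if_false]
      conv_rhs => rw [pvNotesCur]
      simp [h, hc]

lemma pvNotesCur_nil_eq (n : Nat) :
    ∀ lines : List String, lines.length ≤ n → pvNotesCur [] lines = pvNotesGroups lines := by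
  induction n with
  | zero =>
    intro lines h
    have : lines = [] := List.eq_nil_of_length_eq_zero (Nat.le_zero.mp h)
    simp [this, pvNotesCur, pvNotesGroups]
  | succ n ih =>
    intro lines h
    match lines with
    | [] => simp [pvNotesCur, pvNotesGroups]
    | l :: ls =>
      by_cases hb : pvNonBlank l
      · rw [pvNotesCur, if_pos hb]
        simp only [List.nil_append]
        rw [pvNotesCur_ne_nil ls [PySem.Str.strip l] (by simp), pvNotesGroups, if_pos hb]
        have hdrop : ((l :: ls).dropWhile pvNonBlank).length ≤ n := by
          rw [List.dropWhile_cons, if_pos hb]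
          have := List.length_dropWhile_le pvNonBlank ls
          have hlen : ls.length ≤ n := Nat.le_of_succ_le_succ (by simpa using h)
          omega
        rw [List.dropWhile_cons, if_pos hb] at hdrop
        rw [ih _ hdrop]
        simp [hb]
      · rw [pvNotesCur, if_neg hb, pvNotesGroups, if_neg hb]
        exact ih ls (Nat.le_of_succ_le_succ (by simpa using h))

-- ===== VERDICT (by name: the statement is the Claim_ definition above) =====
theorem parse_note_section_py_spec : Claim_equal_parse_note_section_py := by
  intro section_ _
  unfold Spec_parse_note_section_py parse_note_section_py parse_note_section_py_alt
  by_cases hs : section_ = ""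
  · subst hs
    rw [if_pos rfl]
    have h1 : (PySem.Str.split? "" "\n").getD [] = [""] := by decide
    have h2 : pvNonBlank "" = false := by decide
    simp [h1, pvNotesGroups, h2]
  · rw [if_neg hs, pvFold_eq_pvNotesCur,
      pvNotesCur_nil_eq ((PySem.Str.split? section_ "\n").getD []).length _ le_rfl]
    simp
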